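-- pv_equiv track=rewrite | github.com/sandrohp88/code_fight | challenges/scariest_mask.py | count_asymetric
-- ===== SOURCE A (Python) =====
-- def count_asymetric(s):
--     start = 0
--     end = len(s) - 1
--     asymetric = 0
--     while start < end:
--         if s[start] != s[end]:
--             asymetric += 1
--         start += 1
--         end -= 1
--     return asymetric
-- ===== SOURCE B (Python) =====
-- def count_asymetric(s):
--     return sum(a != b for a, b in zip(s, reversed(s))) // 2
-- ===== Notes on version B (the rewrite author's own statement) =====
-- stated objective: idiomatic
-- what changed: Replaces the half-range two-pointer while loop with a full-length zip of the string against its reverse, counting all mismatched mirror positions and halving the (always even) total.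
import Mathlib
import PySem

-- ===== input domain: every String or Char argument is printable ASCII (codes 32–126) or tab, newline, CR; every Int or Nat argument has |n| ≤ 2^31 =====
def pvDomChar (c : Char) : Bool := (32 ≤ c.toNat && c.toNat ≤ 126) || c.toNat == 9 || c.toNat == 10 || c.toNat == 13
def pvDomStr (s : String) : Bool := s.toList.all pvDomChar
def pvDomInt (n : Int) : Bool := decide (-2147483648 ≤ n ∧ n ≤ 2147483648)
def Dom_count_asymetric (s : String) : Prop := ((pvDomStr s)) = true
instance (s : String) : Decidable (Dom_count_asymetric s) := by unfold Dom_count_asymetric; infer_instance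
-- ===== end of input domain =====

-- B replaces A's half-range two-pointer while loop by the idiomatic
-- 'sum(a != b for a, b in zip(s, reversed(s))) // 2' (count mismatches over the
-- full length against the reverse, then halve the always-even total).

-- ===== PORT A =====
-- the while loop of A; inside the loop 0 ≤ start < e < length, so pyGetD is
-- exact for Python's s[start] / s[end] (never raises there)
def countAsymLoop (cs : List Char) (start e asym : Int) : Int :=
  if start < e then
    countAsymLoop cs (start + 1) (e - 1)
      (if PySem.List.pyGetD cs start ' ' ≠ PySem.List.pyGetD cs e ' ' then asym + 1 else asym)
  else asym
termination_by (e - start).toNat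
decreasing_by omega

def count_asymetric (s : String) : Int :=
  countAsymLoop s.toList 0 ((s.toList.length : Int) - 1) 0

-- ===== PORT B =====
-- sum of booleans = countP; zip s with its reverse, count mismatches, floor-divide by 2
def count_asymetric_alt (s : String) : Int :=
  PySem.Int.floordiv ((s.toList.zip s.toList.reverse).countP (fun p => p.1 != p.2) : Int) 2

-- ===== PRECONDITION & SPEC =====
def Spec_count_asymetric (s : String) (out : Int) : Prop := out = count_asymetric_alt s
instance (s : String) (out : Int) : Decidable (Spec_count_asymetric s out) := by unfold Spec_count_asymetric; infer_instance

-- ===== CLAIM (what is proved, stated in full; the proofs are below) =====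
def Claim_equal_count_asymetric : Prop := ∀ (s : String), Dom_count_asymetric s → Spec_count_asymetric s (count_asymetric s)

-- ===== LEMMAS AND PROOFS =====

-- indicator of a mismatched mirror pair at index i
def pvF (cs : List Char) (i : Nat) : Int :=
  if cs.getD i ' ' ≠ cs.getD (cs.length - 1 - i) ' ' then 1 else 0

theorem pvF_symm (cs : List Char) (i : Nat) (h : i < cs.length) :
    pvF cs (cs.length - 1 - i) = pvF cs i := by
  unfold pvF
  have : cs.length - 1 - (cs.length - 1 - i) = i := by omega
  rw [this]
  simp only [ne_comm]

theorem pvF_mid (cs : List Char) (i : Nat) (h : cs.length - 1 - i = i) : pvF cs i = 0 := by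
  unfold pvF; rw [h]; simp

-- A's loop counts the mismatched pairs over the half range [st, n/2)
theorem countAsymLoop_eq (k : Nat) : ∀ (cs : List Char) (st : Nat) (asym : Int),
    cs.length / 2 - st ≤ k →
    countAsymLoop cs (st : Int) ((cs.length : Int) - 1 - st) asym
      = asym + ∑ i ∈ Finset.Ico st (cs.length / 2), pvF cs i := by
  induction k with
  | zero =>
    intro cs st asym hk
    have hst : cs.length / 2 ≤ st := by omega
    rw [countAsymLoop]
    rw [if_neg (by omega)]
    rw [Finset.Ico_eq_empty (by omega)]
    simp
  | succ k ih =>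
    intro cs st asym hk
    by_cases hst : st < cs.length / 2
    · have hcond : (st : Int) < (cs.length : Int) - 1 - st := by
        have := Nat.lt_of_lt_of_le hst (Nat.div_le_self _ _)
        omega
      rw [countAsymLoop, if_pos hcond]
      have he : (cs.length : Int) - 1 - (st : Int) - 1 = (cs.length : Int) - 1 - ((st + 1 : Nat) : Int) := by
        push_cast; ring
      have hrec := ih cs (st + 1)
        (if PySem.List.pyGetD cs (st : Int) ' ' ≠ PySem.List.pyGetD cs ((cs.length : Int) - 1 - st) ' '
          then asym + 1 else asym) (by omega)
      push_cast at hrec ⊢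
      rw [he] at *
      push_cast at *
      rw [hrec]
      -- identify the loop's condition with pvF at st
      have hslt : st < cs.length := by omega
      have h1 : PySem.List.pyGetD cs (st : Int) ' ' = cs.getD st ' ' := by
        simp [PySem.List.pyGetD_natCast]
      have h2 : PySem.List.pyGetD cs ((cs.length : Int) - 1 - st) ' '
          = cs.getD (cs.length - 1 - st) ' ' := by
        have : ((cs.length : Int) - 1 - st) = ((cs.length - 1 - st : Nat) : Int) := by omega
        rw [this, PySem.List.pyGetD_natCast]
      rw [Finset.sum_eq_sum_Ico_succ_bot hst]
      unfold pvF
      rw [h1, h2]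
      split_ifs <;> ring
    · have hcond : ¬ ((st : Int) < (cs.length : Int) - 1 - st) := by
        have : cs.length ≤ 2 * st + 1 := by omega
        omega
      rw [countAsymLoop, if_neg hcond, Finset.Ico_eq_empty (by omega)]
      simp

-- countP as a sum of indicators over positions
theorem countP_eq_sum_int {α : Type} (p : α → Bool) (d : α) :
    ∀ (l : List α), (l.countP p : Int)
      = ∑ i ∈ Finset.range l.length, (if p (l.getD i d) then (1 : Int) else 0) := by
  intro l
  induction l with
  | nil => simp
  | cons x l ih =>
    rw [List.countP_cons, List.length_cons, Finset.sum_range_succ']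
    simp only [List.getD_cons_succ, List.getD_cons_zero]
    push_cast
    rw [ih]

-- the full-length mismatch count is twice the half-range count
theorem full_eq_two_mul_half (cs : List Char) :
    (∑ i ∈ Finset.range cs.length, pvF cs i)
      = 2 * ∑ i ∈ Finset.Ico 0 (cs.length / 2), pvF cs i := by
  set n := cs.length with hn
  have hsplit : (∑ i ∈ Finset.range n, pvF cs i)
      = (∑ i ∈ Finset.Ico 0 (n / 2), pvF cs i) + ∑ i ∈ Finset.Ico (n / 2) n, pvF cs i := by
    rw [Finset.range_eq_Ico, ← Finset.sum_Ico_consecutive _ (Nat.zero_le _) (Nat.div_le_self _ _)]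
  have hrefl : (∑ i ∈ Finset.Ico (n / 2) n, pvF cs i)
      = ∑ i ∈ Finset.Ico 0 (n - n / 2), pvF cs i := by
    have h1 : (∑ i ∈ Finset.Ico (n / 2) n, pvF cs i)
        = ∑ i ∈ Finset.Ico (n / 2) n, pvF cs (n - 1 - i) := by
      refine Finset.sum_congr rfl ?_
      intro i hi
      rw [Finset.mem_Ico] at hi
      rw [← hn] at *
      exact (pvF_symm cs i (by omega)).symm
    rw [h1]
    rcases Nat.eq_zero_or_pos n with h0 | hpos
    · simp [h0]
    · have h2 := Finset.sum_Ico_reflect (pvF cs) (n / 2) (n := n - 1) (m := n) (by omega)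
      have e1 : n - 1 + 1 - n = 0 := by omega
      have e2 : n - 1 + 1 - n / 2 = n - n / 2 := by omega
      rw [h2, e1, e2]
  by_cases hpar : n % 2 = 0
  · have : n - n / 2 = n / 2 := by omega
    rw [hsplit, hrefl, this]; ring
  · have hodd : n - n / 2 = n / 2 + 1 := by omega
    rw [hsplit, hrefl, hodd, Finset.sum_Ico_succ_top (Nat.zero_le _)]
    rw [pvF_mid cs (n / 2) (by omega)]
    ring

-- B's value is the half-range count
theorem alt_eq_half (s : String) :
    count_asymetric_alt s = ∑ i ∈ Finset.Ico 0 (s.toList.length / 2), pvF s.toList i := by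
  unfold count_asymetric_alt
  set cs := s.toList with hcs
  have hlen : (cs.zip cs.reverse).length = cs.length := by simp
  rw [countP_eq_sum_int (fun p => p.1 != p.2) (' ', ' '), hlen]
  have hterm : ∀ i ∈ Finset.range cs.length,
      (if ((cs.zip cs.reverse).getD i (' ', ' ')).1 != ((cs.zip cs.reverse).getD i (' ', ' ')).2
        then (1 : Int) else 0) = pvF cs i := by
    intro i hi
    rw [Finset.mem_range] at hi
    have hi' : i < (cs.zip cs.reverse).length := by rw [hlen]; exact hi
    rw [List.getD_eq_getElem _ _ hi', List.getElem_zip, List.getElem_reverse]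
    unfold pvF
    rw [List.getD_eq_getElem cs ' ' (hn := hi),
        List.getD_eq_getElem cs ' ' (hn := by omega)]
    by_cases hc : cs[i] = cs[cs.length - 1 - i] <;> simp [hc]
  rw [Finset.sum_congr rfl hterm, full_eq_two_mul_half]
  have : PySem.Int.floordiv (2 * ∑ i ∈ Finset.Ico 0 (cs.length / 2), pvF cs i) 2
      = ∑ i ∈ Finset.Ico 0 (cs.length / 2), pvF cs i := by
    simp [PySem.Int.floordiv]
  rw [this]

-- ===== VERDICT (by name: the statement is the Claim_ definition above) =====
theorem count_asymetric_spec : Claim_equal_count_asymetric := by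
  intro s _
  unfold Spec_count_asymetric
  unfold count_asymetric
  have h0 : ((0 : Nat) : Int) = 0 := rfl
  have := countAsymLoop_eq (s.toList.length / 2) s.toList 0 0 (by omega)
  rw [h0] at this
  simp only [sub_zero] at this
  rw [this, alt_eq_half, zero_add]
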